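-- pv_equiv track=rewrite | github.com/eleniitaa8/iGEM_SOFTWARE_TEAM | OBPs_search/obps_search/reader.py | _match_voc_index
-- ===== SOURCE A (Python) =====
-- def _match_voc_index(rows: list[list[str]], query: str) -> int:
--     query_clean = query.strip().lower()
--
--     # 1) exact match first
--     for idx, row in enumerate(rows):
--         if len(row) > 1 and row[1].strip().lower() == query_clean:
--             return idx
--
--     # 2) fallback: substring
--     for idx, row in enumerate(rows):
--         if len(row) > 1 and query_clean in row[1].strip().lower():
--             return idx
--
--     return -1
-- ===== SOURCE B (Python) =====
-- def _match_voc_index(rows: list[list[str]], query: str) -> int: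
--     query_clean = query.strip().lower()
--     fallback = -1
--     for idx, row in enumerate(rows):
--         if len(row) > 1:
--             name = row[1].strip().lower()
--             if name == query_clean:
--                 return idx
--             if fallback == -1 and query_clean in name:
--                 fallback = idx
--     return fallback
-- ===== Notes on version B (the rewrite author's own statement) =====
-- stated objective: simpler
-- what changed: Replaces A's two full passes (exact pass, then substring pass) by a single pass that returns immediately on an exact match and records the first substring match in a fallback variable, so each row's name is cleaned once instead of twice.
import Mathlib
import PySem

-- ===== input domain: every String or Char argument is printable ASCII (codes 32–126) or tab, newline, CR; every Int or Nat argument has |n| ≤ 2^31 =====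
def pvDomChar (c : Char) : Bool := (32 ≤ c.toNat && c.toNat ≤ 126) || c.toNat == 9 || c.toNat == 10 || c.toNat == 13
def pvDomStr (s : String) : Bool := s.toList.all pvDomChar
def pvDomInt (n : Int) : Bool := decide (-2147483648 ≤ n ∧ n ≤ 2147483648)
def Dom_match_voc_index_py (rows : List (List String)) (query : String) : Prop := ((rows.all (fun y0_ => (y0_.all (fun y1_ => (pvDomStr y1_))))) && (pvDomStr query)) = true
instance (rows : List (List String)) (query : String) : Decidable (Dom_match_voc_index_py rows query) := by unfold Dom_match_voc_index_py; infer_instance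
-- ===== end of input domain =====

-- ===== PORT A =====
-- B changes only the loop structure (one pass with a fallback instead of two passes); return value proved equal.
-- query.strip().lower() / row[1].strip().lower()
def mviClean (s : String) : String := PySem.Str.lower (PySem.Str.strip s)

-- A's first loop: return idx on exact match
def mviPassExact (q : String) : List (Int × List String) → Option Int
  | [] => none
  | (i, row) :: rest =>
    if decide (1 < row.length) && (mviClean (PySem.List.pyGetD row 1 "") == q) then some i
    else mviPassExact q rest

-- A's second loop: return idx on substring match
def mviPassSub (q : String) : List (Int × List String) → Option Int
  | [] => none
  | (i, row) :: rest =>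
    if decide (1 < row.length) && PySem.Str.isIn q (mviClean (PySem.List.pyGetD row 1 "")) then some i
    else mviPassSub q rest

def match_voc_index_py (rows : List (List String)) (query : String) : Int :=
  let qc := mviClean query
  match mviPassExact qc (PySem.List.enumerate rows 0) with
  | some i => i
  | none =>
    match mviPassSub qc (PySem.List.enumerate rows 0) with
    | some i => i
    | none => -1

-- ===== PORT B =====
-- single pass: immediate return on exact match, first substring match kept as fallback
def mviLoop (q : String) (fallback : Int) : List (Int × List String) → Int
  | [] => fallback
  | (i, row) :: rest =>
    if decide (1 < row.length) then
      let name := mviClean (PySem.List.pyGetD row 1 "")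
      if name == q then i
      else if fallback == -1 && PySem.Str.isIn q name then mviLoop q i rest
      else mviLoop q fallback rest
    else mviLoop q fallback rest

def match_voc_index_py_alt (rows : List (List String)) (query : String) : Int :=
  mviLoop (mviClean query) (-1) (PySem.List.enumerate rows 0)

-- ===== PRECONDITION & SPEC =====
def Spec_match_voc_index_py (rows : List (List String)) (query : String) (out : Int) : Prop := out = match_voc_index_py_alt rows query
instance (rows : List (List String)) (query : String) (out : Int) : Decidable (Spec_match_voc_index_py rows query out) := by unfold Spec_match_voc_index_py; infer_instance

-- ===== CLAIM (what is proved, stated in full; the proofs are below) =====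
def Claim_equal_match_voc_index_py : Prop := ∀ (rows : List (List String)) (query : String), Dom_match_voc_index_py rows query → Spec_match_voc_index_py rows query (match_voc_index_py rows query)

-- ===== LEMMAS AND PROOFS =====

-- loop invariant: the single pass equals "exact match first, else (if no fallback yet) first substring match, else the fallback"
theorem mviLoop_enum (q : String) (rows : List (List String)) (s f : Int) (hs : 0 ≤ s) :
    mviLoop q f (PySem.List.enumerate rows s) =
      match mviPassExact q (PySem.List.enumerate rows s) with
      | some i => i
      | none =>
        if f = -1 then (mviPassSub q (PySem.List.enumerate rows s)).getD (-1) else f := by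
  induction rows generalizing s f with
  | nil =>
    by_cases hf : f = -1 <;>
      simp [PySem.List.enumerate, mviLoop, mviPassExact, mviPassSub, hf]
  | cons r rs ih =>
    rw [PySem.List.enumerate_cons]
    by_cases hlen : 1 < r.length
    · by_cases hex : mviClean (PySem.List.pyGetD r 1 "") = q
      · simp [mviLoop, mviPassExact, hlen, hex]
      · by_cases hsub : PySem.Chars.isIn q.toList (mviClean (PySem.List.pyGetD r 1 "")).toList = true
        · by_cases hf : f = -1
          · have hs' : s ≠ -1 := by omega
            simp [mviLoop, mviPassExact, mviPassSub, hlen, hex, hsub, hf,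
              ih (s+1) s (by omega), hs']
          · simp [mviLoop, mviPassExact, hlen, hex, hsub, hf,
              ih (s+1) f (by omega)]
        · simp [mviLoop, mviPassExact, mviPassSub, hlen, hex, hsub,
            ih (s+1) f (by omega)]
    · simp [mviLoop, mviPassExact, mviPassSub, hlen, ih (s+1) f (by omega)]

-- ===== VERDICT (by name: the statement is the Claim_ definition above) =====
theorem match_voc_index_py_spec : Claim_equal_match_voc_index_py := by
  intro rows query _
  unfold Spec_match_voc_index_py match_voc_index_py match_voc_index_py_alt
  rw [mviLoop_enum _ _ 0 (-1) (by omega)]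
  cases hex : mviPassExact (mviClean query) (PySem.List.enumerate rows 0) <;>
    cases hsub : mviPassSub (mviClean query) (PySem.List.enumerate rows 0) <;>
      simp [hex, hsub]
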